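-- pv_equiv track=rewrite | github.com/AsahelMain/Ing-Software-2024-2 | Practica01/Script2.py | numero_de_valles
-- ===== SOURCE A (Python) =====
-- def numero_de_valles(cadena):
--     """
--     Calcula el numero de valles de una cadena
--
--     :param cadena: cadena formada por caracteres 'D' y 'U'
--     :return: numero de valles
--     """
--     contador = 0
--     es_valle = False
--     respuesta = 0
--     for letra in cadena:
--         if letra == 'U':
--             contador += 1
--         else:
--             contador -= 1
--         if es_valle and contador == 0:
--             es_valle = False
--             respuesta += 1
--
--         if contador < 0:
--             es_valle = True
--     return respuesta
-- ===== SOURCE B (Python) =====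
-- def numero_de_valles(cadena):
--     profile = []
--     alt = 0
--     for c in cadena:
--         alt += 1 if c == 'U' else -1
--         profile.append(alt)
--     return sum(1 for prev, cur in zip([0] + profile, profile)
--                if prev < 0 and cur == 0)
-- ===== Notes on version B (the rewrite author's own statement) =====
-- stated objective: alternative
-- what changed: B builds the full altitude profile of prefix sums first and then, in a separate counting pass over consecutive pairs, counts positions where the altitude returns to 0 from a negative value, instead of A's single loop tracking an es_valle flag alongside the counter.
import Mathlib
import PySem

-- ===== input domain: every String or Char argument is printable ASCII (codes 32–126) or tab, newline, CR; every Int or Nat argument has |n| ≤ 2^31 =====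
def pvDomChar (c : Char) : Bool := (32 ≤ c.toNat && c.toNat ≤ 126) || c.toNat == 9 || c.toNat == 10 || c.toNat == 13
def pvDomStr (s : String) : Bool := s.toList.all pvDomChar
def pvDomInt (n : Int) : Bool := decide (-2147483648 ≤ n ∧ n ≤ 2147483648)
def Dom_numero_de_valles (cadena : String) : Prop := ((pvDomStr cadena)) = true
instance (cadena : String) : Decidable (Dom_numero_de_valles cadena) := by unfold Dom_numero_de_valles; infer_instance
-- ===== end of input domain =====

-- B replaces A's single loop with an es_valle flag by a two-phase decomposition
-- (prefix-sum altitude profile, then a pairwise count); same O(n) cost.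

-- ===== PORT A =====
-- one loop step of A: state = (contador, es_valle, respuesta)
def pvStepA (st : Int × Bool × Int) (letra : Char) : Int × Bool × Int :=
  let contador := if letra = 'U' then st.1 + 1 else st.1 - 1
  let es_valle := st.2.1
  let respuesta := st.2.2
  let p : Bool × Int :=
    if es_valle ∧ contador = 0 then (false, respuesta + 1) else (es_valle, respuesta)
  let es_valle := if contador < 0 then true else p.1
  (contador, es_valle, p.2)

def numero_de_valles (cadena : String) : Int :=
  (cadena.toList.foldl pvStepA (0, false, 0)).2.2

-- ===== PORT B =====
-- the running altitude profile (list of prefix sums), as built by Source B's loop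
def pvProfile : List Char → Int → List Int
  | [], _ => []
  | c :: rest, alt =>
      let alt := alt + (if c = 'U' then 1 else -1)
      alt :: pvProfile rest alt

def numero_de_valles_alt (cadena : String) : Int :=
  let profile := pvProfile cadena.toList 0
  (((0 :: profile).zip profile).filter (fun p => p.1 < 0 && p.2 == 0)).length

-- ===== PRECONDITION & SPEC =====
def Spec_numero_de_valles (cadena : String) (out : Int) : Prop := out = numero_de_valles_alt cadena
instance (cadena : String) (out : Int) : Decidable (Spec_numero_de_valles cadena out) := by unfold Spec_numero_de_valles; infer_instance

-- ===== CLAIM (what is proved, stated in full; the proofs are below) =====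
def Claim_equal_numero_de_valles : Prop := ∀ (cadena : String), Dom_numero_de_valles cadena → Spec_numero_de_valles cadena (numero_de_valles cadena)

-- ===== LEMMAS AND PROOFS =====
-- Invariant: in A's loop es_valle is exactly "contador < 0", and the running
-- respuesta plus B's pairwise count over the remaining profile is constant.
lemma pv_key : ∀ (l : List Char) (c r : Int),
    (l.foldl pvStepA (c, decide (c < 0), r)).2.2
      = r + ((((c :: pvProfile l c).zip (pvProfile l c)).filter
                (fun p => p.1 < 0 && p.2 == 0)).length : Int) := by
  intro l
  induction l with
  | nil => intro c r; simp [pvProfile]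
  | cons ch rest ih =>
      intro c r
      have hstep : pvStepA (c, decide (c < 0), r) ch
          = (c + (if ch = 'U' then 1 else -1),
             decide (c + (if ch = 'U' then 1 else -1) < 0),
             r + if c < 0 ∧ c + (if ch = 'U' then 1 else -1) = 0 then 1 else 0) := by
        simp only [pvStepA]
        by_cases hU : ch = 'U' <;> split_ifs <;>
          simp_all <;> omega
      simp only [List.foldl_cons, hstep, pvProfile]
      rw [ih]
      simp only [List.zip_cons_cons, List.filter_cons]
      by_cases h : c < 0 ∧ c + (if ch = 'U' then 1 else -1) = 0
      · have : ((c, c + (if ch = 'U' then 1 else -1)).1 < 0 &&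
            (c, c + (if ch = 'U' then 1 else -1)).2 == 0) = true := by
          simp [h.1, h.2]
        rw [if_pos h, this]
        simp only [if_pos trivial, List.length_cons]
        push_cast
        ring
      · have : ((c, c + (if ch = 'U' then 1 else -1)).1 < 0 &&
            (c, c + (if ch = 'U' then 1 else -1)).2 == 0) = false := by
          simp only [Bool.and_eq_false_iff, decide_eq_false_iff_not, beq_eq_false_iff_ne]
          by_cases hc : c < 0
          · right; intro hz; exact h ⟨hc, hz⟩
          · left; simpa using hc
        rw [if_neg h, this]
        simp

-- ===== VERDICT (by name: the statement is the Claim_ definition above) =====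
theorem numero_de_valles_spec : Claim_equal_numero_de_valles := by
  intro cadena _
  unfold Spec_numero_de_valles numero_de_valles numero_de_valles_alt
  have := pv_key cadena.toList 0 0
  simpa using this
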